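-- pv_equiv track=rewrite | github.com/zadorian/SEARCH_ENGINEER | modules/brute/targeted_searches/specialized/corporate.py | extract_corporate_query
-- ===== SOURCE A (Python) =====
-- def extract_corporate_query(query: str) -> str:
--     """Extract the actual search query from a corporate search query."""
--     query = query.strip()
--
--     prefixes = [
--         'corporate:', 'company:', 'registry:', 'cr:', 'business:', 'corp:',
--         'Corporate:', 'Company:', 'Registry:', 'CR:', 'Business:', 'Corp:'
--     ]
--
--     for prefix in prefixes:
--         if query.startswith(prefix):
--             query = query[len(prefix):].strip()
--             if query.startswith('"') and query.endswith('"'):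
--                 query = query[1:-1]
--             elif query.startswith("'") and query.endswith("'"):
--                 query = query[1:-1]
--             return query
--
--     return query.strip()
-- ===== SOURCE B (Python) =====
-- _CORP_PREFIXES = frozenset([
--     'corporate:', 'company:', 'registry:', 'cr:', 'business:', 'corp:',
--     'Corporate:', 'Company:', 'Registry:', 'CR:', 'Business:', 'Corp:'
-- ])
--
--
-- def extract_corporate_query(query: str) -> str:
--     """Extract the actual search query from a corporate search query."""
--     query = query.strip()
--
--     idx = query.find(':')
--     if idx != -1 and query[:idx + 1] in _CORP_PREFIXES:
--         query = query[idx + 1:].strip()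
--         if query.startswith('"') and query.endswith('"'):
--             query = query[1:-1]
--         elif query.startswith("'") and query.endswith("'"):
--             query = query[1:-1]
--         return query
--
--     return query.strip()
-- ===== Notes on version B (the rewrite author's own statement) =====
-- stated objective: alternative
-- what changed: Replaces A's linear scan over 12 startswith tests with a single first-colon search plus one frozenset membership test on the slice up to that colon.
import Mathlib
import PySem

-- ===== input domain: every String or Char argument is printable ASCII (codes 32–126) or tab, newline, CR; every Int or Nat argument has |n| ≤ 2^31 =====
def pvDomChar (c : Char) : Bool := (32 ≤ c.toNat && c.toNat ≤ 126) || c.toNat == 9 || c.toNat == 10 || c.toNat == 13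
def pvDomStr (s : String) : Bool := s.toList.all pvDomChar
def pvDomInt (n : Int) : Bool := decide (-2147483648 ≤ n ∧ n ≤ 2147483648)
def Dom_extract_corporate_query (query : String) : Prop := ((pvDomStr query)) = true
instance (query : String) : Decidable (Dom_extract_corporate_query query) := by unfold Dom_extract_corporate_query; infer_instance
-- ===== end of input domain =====

-- B replaces A's scan over 12 startswith tests by one find(':') plus a set lookup on the slice up to the first colon (alternative single-pass decomposition).

-- ===== PORT A =====
def pvPrefixesA : List String :=
  ["corporate:", "company:", "registry:", "cr:", "business:", "corp:",
   "Corporate:", "Company:", "Registry:", "CR:", "Business:", "Corp:"]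

def pvUnquoteA (q : String) : String :=
  if PySem.Str.startswith q "\"" && PySem.Str.endswith q "\"" then
    PySem.Str.slice q (some 1) (some (-1))
  else if PySem.Str.startswith q "'" && PySem.Str.endswith q "'" then
    PySem.Str.slice q (some 1) (some (-1))
  else q

def pvLoopA (q : String) : List String → String
  | [] => PySem.Str.strip q
  | p :: rest =>
    if PySem.Str.startswith q p then
      pvUnquoteA (PySem.Str.strip (PySem.Str.slice q (some (PySem.Str.len p)) none))
    else pvLoopA q rest

def extract_corporate_query (query : String) : String :=
  pvLoopA (PySem.Str.strip query) pvPrefixesA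

-- ===== PORT B =====
def pvPrefixSetB : PySem.Set String :=
  PySem.Set.ofList
    ["corporate:", "company:", "registry:", "cr:", "business:", "corp:",
     "Corporate:", "Company:", "Registry:", "CR:", "Business:", "Corp:"]

def pvUnquoteB (q : String) : String :=
  if PySem.Str.startswith q "\"" && PySem.Str.endswith q "\"" then
    PySem.Str.slice q (some 1) (some (-1))
  else if PySem.Str.startswith q "'" && PySem.Str.endswith q "'" then
    PySem.Str.slice q (some 1) (some (-1))
  else q

def extract_corporate_query_alt (query : String) : String :=
  let q := PySem.Str.strip query
  let idx := PySem.Str.find q ":"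
  if idx != -1 && PySem.Set.contains pvPrefixSetB (PySem.Str.slice q none (some (idx + 1))) then
    pvUnquoteB (PySem.Str.strip (PySem.Str.slice q (some (idx + 1)) none))
  else PySem.Str.strip q

-- ===== PRECONDITION & SPEC =====
def Spec_extract_corporate_query (query : String) (out : String) : Prop := out = extract_corporate_query_alt query
instance (query : String) (out : String) : Decidable (Spec_extract_corporate_query query out) := by unfold Spec_extract_corporate_query; infer_instance

-- ===== CLAIM (what is proved, stated in full; the proofs are below) =====
def Claim_equal_extract_corporate_query : Prop := ∀ (query : String), Dom_extract_corporate_query query → Spec_extract_corporate_query query (extract_corporate_query query)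

-- ===== LEMMAS AND PROOFS =====

-- Every prefix is nonempty and its unique ':' is its last character.
def pvGood (p : String) : Prop :=
  p.toList ≠ [] ∧ ∀ i (h : i < p.toList.length), (p.toList[i] = ':' ↔ i = p.toList.length - 1)

lemma pvGood_all : ∀ p ∈ pvPrefixesA, pvGood p := by
  intro p hp
  fin_cases hp <;> exact ⟨by decide, by decide⟩

lemma pvUnquote_eq : pvUnquoteA = pvUnquoteB := rfl

-- If no prefix matches, A's loop falls through.
lemma pvLoopA_no_match (q : String) (l : List String)
    (h : ∀ p ∈ l, PySem.Str.startswith q p = false) :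
    pvLoopA q l = PySem.Str.strip q := by
  induction l with
  | nil => rfl
  | cons p rest ih =>
    have hp := h p (List.mem_cons_self ..)
    simp only [pvLoopA, hp, Bool.false_eq_true, if_false]
    exact ih (fun p hp => h p (List.mem_cons_of_mem _ hp))

-- If c is the unique matching prefix in l, A's loop returns its branch for c.
lemma pvLoopA_unique (q c : String) (l : List String)
    (hc : c ∈ l) (hm : PySem.Str.startswith q c = true)
    (hu : ∀ p ∈ l, PySem.Str.startswith q p = true → p = c) :
    pvLoopA q l = pvUnquoteA (PySem.Str.strip (PySem.Str.slice q (some (PySem.Str.len c)) none)) := by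
  induction l with
  | nil => cases hc
  | cons p rest ih =>
    by_cases hp : PySem.Str.startswith q p = true
    · have := hu p (List.mem_cons_self ..) hp
      subst this
      simp only [pvLoopA, hp, if_true]
    · have hpf : PySem.Str.startswith q p = false := by
        rwa [Bool.not_eq_true] at hp
      simp only [pvLoopA, hpf, Bool.false_eq_true, if_false]
      have hc' : c ∈ rest := by
        rcases List.mem_cons.mp hc with h | h
        · subst h; rw [hm] at hpf; cases hpf
        · exact h
      exact ih hc' (fun p hp' => hu p (List.mem_cons_of_mem _ hp'))

-- a singleton list is a prefix exactly when it is the head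
lemma pvSingleton_prefix {α : Type} (a : α) (l : List α) : ([a] <+: l) ↔ l.head? = some a := by
  cases l with
  | nil => simp
  | cons b t => simp [List.cons_prefix_cons, eq_comm]

-- first-colon characterisation: prefix [':'] of drop i ↔ the i-th char is ':'
lemma pvSingleton_prefix_drop (L : List Char) (i : Nat) :
    ([':'] <+: L.drop i) ↔ L[i]? = some ':' := by
  rw [pvSingleton_prefix, List.head?_drop]

-- a good prefix of L puts a ':' at position (length-1) of L
lemma pvPrefix_colon (p : String) (L : List Char) (hg : pvGood p) (hpre : p.toList <+: L) :
    L[p.toList.length - 1]? = some ':' := by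
  obtain ⟨hne, hcol⟩ := hg
  have hlen : 0 < p.toList.length := List.length_pos_iff.mpr hne
  have hlenle : p.toList.length ≤ L.length := hpre.length_le
  have hPeq : p.toList = L.take p.toList.length := List.prefix_iff_eq_take.mp hpre
  have h1 : L[p.toList.length - 1]? = (L.take p.toList.length)[p.toList.length - 1]? :=
    (List.getElem?_take_of_lt (by omega)).symm
  rw [h1, ← hPeq, List.getElem?_eq_getElem (by omega)]
  exact congrArg some ((hcol _ (by omega)).mpr rfl)

-- uniqueness: a good prefix matching L must be exactly L.take (k+1), k the first colon
lemma pvMatch_eq_take (p : String) (L : List Char) (k : Nat)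
    (hg : pvGood p) (hpre : p.toList <+: L)
    (hk : L[k]? = some ':') (hmin : ∀ i < k, ¬ ([':'] <+: L.drop i)) :
    p.toList = L.take (k + 1) := by
  have hcolon := pvPrefix_colon p L hg hpre
  obtain ⟨hne, hcol⟩ := hg
  have hlen : 0 < p.toList.length := List.length_pos_iff.mpr hne
  have hPeq : p.toList = L.take p.toList.length := List.prefix_iff_eq_take.mp hpre
  have h1 : ¬ (p.toList.length - 1 < k) := by
    intro hlt
    exact hmin _ hlt ((pvSingleton_prefix_drop L _).mpr hcolon)
  have h2 : ¬ (k < p.toList.length - 1) := by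
    intro hlt
    have hk' : p.toList[k]? = some ':' := by
      rw [hPeq, List.getElem?_take_of_lt (by omega)]
      exact hk
    obtain ⟨hklt', hkeq⟩ := List.getElem?_eq_some_iff.mp hk'
    have := (hcol k hklt').mp hkeq
    omega
  have hPk : p.toList.length = k + 1 := by omega
  rw [hPeq, hPk]

-- the core case analysis, over the already-stripped string q
lemma pvCore (q : String) :
    pvLoopA q pvPrefixesA =
      (if (PySem.Str.find q ":" != -1 &&
            PySem.Set.contains pvPrefixSetB (PySem.Str.slice q none (some (PySem.Str.find q ":" + 1)))) = true then
        pvUnquoteB (PySem.Str.strip (PySem.Str.slice q (some (PySem.Str.find q ":" + 1)) none))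
      else PySem.Str.strip q) := by
  have hfind : PySem.Str.find q ":" = PySem.Chars.find q.toList [':'] := by
    rw [PySem.Str.find_eq]
    congr 1
  by_cases hneg : PySem.Chars.find q.toList [':'] = -1
  · -- no colon in q: no prefix matches, both sides fall through
    have hnin : ¬ ([':'] <:+: q.toList) := (PySem.Chars.find_eq_neg_one_iff _ _).mp hneg
    have hnm : ∀ p ∈ pvPrefixesA, PySem.Str.startswith q p = false := by
      intro p hp
      by_contra hb
      rw [Bool.not_eq_false, PySem.Str.startswith_eq] at hb
      have hpre : p.toList <+: q.toList := (PySem.Chars.startswith_iff _ _).mp hb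
      have hdropPre : [':'] <+: q.toList.drop (p.toList.length - 1) :=
        (pvSingleton_prefix_drop _ _).mpr (pvPrefix_colon p q.toList (pvGood_all p hp) hpre)
      exact hnin ((PySem.Chars.isIn_iff_infix _ _).mp
        ((PySem.Chars.exists_prefix_drop_iff_isIn _ _).mp ⟨_, hdropPre⟩))
    rw [pvLoopA_no_match q pvPrefixesA hnm, if_neg (by simp [hneg])]
  · -- there is a colon, at position k
    have hnneg : 0 ≤ PySem.Chars.find q.toList [':'] := by
      have := PySem.Chars.neg_one_le_find (s := q.toList) (sub := [':'])
      omega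
    obtain ⟨hpk, hmin⟩ := PySem.Chars.find_spec (s := q.toList) (sub := [':']) hnneg
    have hkval : PySem.Chars.find q.toList [':'] = ((PySem.Chars.find q.toList [':']).toNat : Int) := by omega
    have hkget : q.toList[(PySem.Chars.find q.toList [':']).toNat]? = some ':' :=
      (pvSingleton_prefix_drop _ _).mp hpk
    obtain ⟨hklt, -⟩ := List.getElem?_eq_some_iff.mp hkget
    have hcand : (PySem.Str.slice q none (some (PySem.Str.find q ":" + 1))).toList
        = q.toList.take ((PySem.Chars.find q.toList [':']).toNat + 1) := by
      rw [PySem.Str.toList_slice, PySem.Chars.slice_eq_listSlice, hfind, hkval]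
      have : (((PySem.Chars.find q.toList [':']).toNat : Int)) + 1
          = (((PySem.Chars.find q.toList [':']).toNat + 1 : Nat) : Int) := by push_cast; ring
      rw [this, PySem.List.slice_to_natCast]
      congr 1
    have hne1 : (PySem.Str.find q ":" != -1) = true := by
      simp
      omega
    by_cases hmemb : PySem.Set.contains pvPrefixSetB
        (PySem.Str.slice q none (some (PySem.Str.find q ":" + 1))) = true
    · -- candidate is one of the known prefixes: it is A's unique match
      have hcmem : PySem.Str.slice q none (some (PySem.Str.find q ":" + 1)) ∈ pvPrefixesA := by
        rw [PySem.Set.contains] at hmemb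
        simpa [pvPrefixSetB, PySem.Set.ofList, pvPrefixesA] using hmemb
      have hcm : PySem.Str.startswith q (PySem.Str.slice q none (some (PySem.Str.find q ":" + 1))) = true := by
        rw [PySem.Str.startswith_eq]
        refine (PySem.Chars.startswith_iff _ _).mpr ?_
        rw [hcand]
        exact List.take_prefix _ _
      have hu : ∀ p ∈ pvPrefixesA, PySem.Str.startswith q p = true →
          p = PySem.Str.slice q none (some (PySem.Str.find q ":" + 1)) := by
        intro p hp hps
        rw [PySem.Str.startswith_eq] at hps
        have hpre : p.toList <+: q.toList := (PySem.Chars.startswith_iff _ _).mp hps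
        have := pvMatch_eq_take p q.toList _ (pvGood_all p hp) hpre hkget hmin
        exact String.toList_inj.mp (this.trans hcand.symm)
      rw [pvLoopA_unique q _ pvPrefixesA hcmem hcm hu]
      have hlen : PySem.Str.len (PySem.Str.slice q none (some (PySem.Str.find q ":" + 1)))
          = PySem.Str.find q ":" + 1 := by
        rw [PySem.Str.len_eq]
        have hl : (PySem.Str.slice q none (some (PySem.Str.find q ":" + 1))).toList.length
            = (PySem.Chars.find q.toList [':']).toNat + 1 := by
          rw [hcand, List.length_take]
          omega
        rw [hl, hfind]
        omega
      rw [if_pos (by rw [hne1, hmemb]; rfl), hlen, pvUnquote_eq]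
    · -- candidate is not a known prefix: no prefix matches at all
      have hnm : ∀ p ∈ pvPrefixesA, PySem.Str.startswith q p = false := by
        intro p hp
        by_contra hb
        rw [Bool.not_eq_false, PySem.Str.startswith_eq] at hb
        have hpre : p.toList <+: q.toList := (PySem.Chars.startswith_iff _ _).mp hb
        have hpt := pvMatch_eq_take p q.toList _ (pvGood_all p hp) hpre hkget hmin
        apply hmemb
        have hpcand : p = PySem.Str.slice q none (some (PySem.Str.find q ":" + 1)) :=
          String.toList_inj.mp (hpt.trans hcand.symm)
        rw [← hpcand, PySem.Set.contains]
        simpa [pvPrefixSetB, PySem.Set.ofList, pvPrefixesA] using hp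
      rw [pvLoopA_no_match q pvPrefixesA hnm, if_neg]
      rw [Bool.not_eq_true] at hmemb ⊢
      rw [Bool.and_eq_false_iff]
      exact Or.inr hmemb

-- ===== VERDICT (by name: the statement is the Claim_ definition above) =====
theorem extract_corporate_query_spec : Claim_equal_extract_corporate_query := by
  intro query _
  unfold Spec_extract_corporate_query extract_corporate_query extract_corporate_query_alt
  exact pvCore (PySem.Str.strip query)
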